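-- pv_equiv track=rewrite | github.com/pypi-data/pypi-mirror-401 | packages/qlsdk2/qlsdk2-0.6.0a11.tar.gz/qlsdk2-0.6.0a11/src/qlsdk/rsc/device/arskindling.py | get_sorted_indices_basic
-- ===== SOURCE A (Python) =====
-- def get_sorted_indices_basic(A, B):
--     """
--     找出数组A中存在于数组B的元素，并返回这些元素在A中的位置，且顺序与它们在B中的顺序一致。
--
--     参数:
--         A (list): 待查找的数组。
--         B (list): 作为参考的数组。
--
--     返回:
--         list: 一个列表，包含符合条件的元素在A中的索引，顺序与这些元素在B中的出现顺序一致。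
--     """
--     # 1. 创建B中元素到其索引的映射
--     b_index_map = {value: idx for idx, value in enumerate(B)}
--
--     # 2. 筛选A中存在于B的元素，并记录其在A中的索引及在B中的位置
--     # 使用列表推导式，同时避免重复元素干扰（如果B有重复，以第一次出现为准）
--     found_elements = []
--     for idx_a, value in enumerate(A):
--         if value in b_index_map:
--             # 记录: (该元素在A中的索引, 该元素在B中的索引)
--             found_elements.append((idx_a, b_index_map[value]))
--
--     # 3. 根据元素在B中的位置进行排序
--     # 排序的依据是元组的第二个元素，即 b_index_map[value]
--     found_elements_sorted = sorted(found_elements, key=lambda x: x[1])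
--
--     # 4. 提取排序后在A中的索引，形成结果数组C
--     array_C = [item[0] for item in found_elements_sorted]
--
--     return array_C
-- ===== SOURCE B (Python) =====
-- def get_sorted_indices_basic(A, B):
--     # Bucket placement by B-position: no comparison sort.
--     pos = {}
--     for j, v in enumerate(B):
--         pos[v] = j
--     buckets = {}
--     for i, v in enumerate(A):
--         j = pos.get(v)
--         if j is not None:
--             buckets.setdefault(j, []).append(i)
--     out = []
--     for j in range(len(B)):
--         out.extend(buckets.get(j, []))
--     return out
-- ===== Notes on version B (the rewrite author's own statement) =====
-- stated objective: alternative
-- what changed: Replaces the comparison sort of (A-index, B-index) pairs by direct bucket placement keyed by B-position, concatenating the buckets in B order; asymptotically O(n+m) but in CPython the constant factors make it comparable, so no speed is claimed.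
import Mathlib
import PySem

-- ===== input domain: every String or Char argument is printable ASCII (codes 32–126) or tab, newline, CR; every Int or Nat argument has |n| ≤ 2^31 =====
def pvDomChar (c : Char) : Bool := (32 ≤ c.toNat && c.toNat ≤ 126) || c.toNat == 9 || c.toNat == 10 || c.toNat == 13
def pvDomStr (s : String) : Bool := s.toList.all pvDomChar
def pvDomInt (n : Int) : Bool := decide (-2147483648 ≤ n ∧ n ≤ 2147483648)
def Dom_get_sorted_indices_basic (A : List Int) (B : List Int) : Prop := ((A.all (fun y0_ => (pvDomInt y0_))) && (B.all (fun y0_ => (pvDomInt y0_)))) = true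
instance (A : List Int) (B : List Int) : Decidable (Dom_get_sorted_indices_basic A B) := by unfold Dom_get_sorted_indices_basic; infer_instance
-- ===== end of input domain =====

-- B replaces A's comparison sort of (A-index, B-index) pairs by bucket placement keyed by
-- B-position (alternative algorithm, same results; no speed claimed).


-- ===== PORT A =====
-- b_index_map = {value: idx for idx, value in enumerate(B)}  (later duplicates overwrite)
def pvBIndexMap (B : List Int) : PySem.Dict Int Int :=
  (PySem.List.enumerate B).foldl (fun d p => d.insert p.2 p.1) PySem.Dict.empty

def get_sorted_indices_basic (A : List Int) (B : List Int) : List Int :=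
  let b_index_map := pvBIndexMap B
  let found_elements : List (Int × Int) :=
    (PySem.List.enumerate A).foldl
      (fun acc p =>
        if b_index_map.contains p.2 then acc ++ [(p.1, b_index_map.getD p.2 0)] else acc) []
  let found_elements_sorted := PySem.List.sorted found_elements (fun x => x.2) false
  found_elements_sorted.map (fun item => item.1)

-- ===== PORT B =====
def get_sorted_indices_basic_alt (A : List Int) (B : List Int) : List Int :=
  let pos := pvBIndexMap B
  let buckets : PySem.Dict Int (List Int) :=
    (PySem.List.enumerate A).foldl
      (fun d p =>
        match pos.get? p.2 with
        | some j => d.modify j [] (· ++ [p.1])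
        | none => d) PySem.Dict.empty
  (PySem.List.pyRange 0 (PySem.List.len B) 1).foldl (fun out j => out ++ buckets.getD j []) []

-- ===== PRECONDITION & SPEC =====
def Spec_get_sorted_indices_basic (A : List Int) (B : List Int) (out : List Int) : Prop := out = get_sorted_indices_basic_alt A B
instance (A : List Int) (B : List Int) (out : List Int) : Decidable (Spec_get_sorted_indices_basic A B out) := by unfold Spec_get_sorted_indices_basic; infer_instance

-- ===== CLAIM (what is proved, stated in full; the proofs are below) =====
def Claim_equal_get_sorted_indices_basic : Prop := ∀ (A : List Int) (B : List Int), Dom_get_sorted_indices_basic A B → Spec_get_sorted_indices_basic A B (get_sorted_indices_basic A B)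

-- ===== LEMMAS AND PROOFS =====

-- every index stored in the B-position map is a valid position of B
lemma pvBIndexMap_bound (B : List Int) (v j : Int)
    (h : (pvBIndexMap B).get? v = some j) : 0 ≤ j ∧ j < (B.length : Int) := by
  have key : ∀ (l : List (Int × Int)) (d : PySem.Dict Int Int),
      (∀ v j, d.get? v = some j → 0 ≤ j ∧ j < (B.length : Int)) →
      (∀ p ∈ l, 0 ≤ p.1 ∧ p.1 < (B.length : Int)) →
      ∀ v j, (l.foldl (fun d p => d.insert p.2 p.1) d).get? v = some j →
        0 ≤ j ∧ j < (B.length : Int) := by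
    intro l
    induction l with
    | nil => intro d hd _ v j h; exact hd v j h
    | cons p t ih =>
      intro d hd hl v j h
      refine ih (d.insert p.2 p.1) ?_ (fun q hq => hl q (List.mem_cons_of_mem _ hq)) v j h
      intro v' j' h'
      rw [PySem.Dict.get?_insert] at h'
      split at h'
      · cases h'; exact hl p (List.mem_cons_self)
      · exact hd v' j' h'
  refine key (PySem.List.enumerate B) PySem.Dict.empty ?_ ?_ v j h
  · intro v j h; simp [PySem.Dict.get?_empty] at h
  · intro p hp
    rw [PySem.List.mem_enumerate_iff] at hp
    obtain ⟨k, hk, rfl⟩ := hp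
    constructor
    · simp
    · simpa using hk

-- insertBy passes over a prefix it does not insert into
lemma insertBy_append_not {α : Type} (before : α → α → Bool) (x : α) (L1 L2 : List α)
    (h : ∀ y ∈ L1, before x y = false) :
    PySem.List.insertBy before x (L1 ++ L2) = L1 ++ PySem.List.insertBy before x L2 := by
  induction L1 with
  | nil => simp
  | cons a t ih =>
    simp only [List.cons_append, PySem.List.insertBy, h a List.mem_cons_self,
      Bool.false_eq_true, if_false]
    rw [ih (fun y hy => h y (List.mem_cons_of_mem _ hy))]

-- stable insertion sort by an Int key bounded by m is bucket concatenation
lemma stable_sort_eq_buckets {α : Type} (m : Nat) (xs : List (α × Int))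
    (h : ∀ x ∈ xs, 0 ≤ x.2 ∧ x.2 < (m : Int)) :
    PySem.List.sorted xs (fun x => x.2) false
      = (List.range m).flatMap (fun (j : Nat) => xs.filter (fun x => x.2 == (j : Int))) := by
  rw [PySem.List.sorted_eq_foldl_insertBy]
  induction xs using List.reverseRecOn with
  | nil => simp
  | append_singleton t x ih =>
    have hx := h x (by simp)
    have ht : ∀ y ∈ t, 0 ≤ y.2 ∧ y.2 < (m : Int) := fun y hy => h y (by simp [hy])
    rw [List.foldl_append, List.foldl_cons, List.foldl_nil, ih ht]
    obtain ⟨k, hx2⟩ : ∃ k : Nat, x.2 = (k : Int) := ⟨x.2.toNat, by omega⟩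
    have hkm : k < m := by
      have := hx.2; rw [hx2] at this; exact_mod_cast this
    set F : Nat → List (α × Int) := fun j => t.filter (fun y => y.2 == (j : Int)) with hF
    set G : Nat → List (α × Int) := fun j => (t ++ [x]).filter (fun y => y.2 == (j : Int)) with hG
    have hGF : ∀ j, G j = F j ++ (if k = j then [x] else []) := by
      intro j
      simp only [hG, hF, List.filter_append]
      congr 1
      by_cases hj : k = j
      · simp [hx2, hj]
      · have : ¬ x.2 = (j : Int) := by rw [hx2]; exact_mod_cast hj
        simp [this, hj]
    have hmemF : ∀ j y, y ∈ F j → y.2 = (j : Int) := by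
      intro j y hy; simp only [hF, List.mem_filter, beq_iff_eq] at hy; exact hy.2
    have hsplit : List.range m = List.range (k+1) ++ (List.range (m - (k+1))).map (fun i => (k+1) + i) := by
      rw [← List.range_add]; congr 1; omega
    have h1 : ∀ y ∈ (List.range (k+1)).flatMap F, (decide (x.2 < y.2)) = false := by
      intro y hy
      simp only [List.mem_flatMap, List.mem_range] at hy
      obtain ⟨j, hj, hyF⟩ := hy
      have hy2 := hmemF j y hyF
      simp only [decide_eq_false_iff_not, not_lt, hy2, hx2]
      exact_mod_cast Nat.le_of_lt_succ hj
    have h2 : PySem.List.insertBy (fun a b => decide (a.2 < b.2)) x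
        (((List.range (m - (k+1))).map (fun i => (k+1) + i)).flatMap F)
        = x :: ((List.range (m - (k+1))).map (fun i => (k+1) + i)).flatMap F := by
      cases hL : ((List.range (m - (k+1))).map (fun i => (k+1) + i)).flatMap F with
      | nil => simp [PySem.List.insertBy]
      | cons z zs =>
        have hz : z ∈ ((List.range (m - (k+1))).map (fun i => (k+1) + i)).flatMap F := by
          rw [hL]; exact List.mem_cons_self
        simp only [List.mem_flatMap, List.mem_map, List.mem_range] at hz
        obtain ⟨j, ⟨i, hi, rfl⟩, hzF⟩ := hz
        have hz2 := hmemF _ z hzF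
        have hlt : x.2 < z.2 := by
          rw [hz2, hx2]; exact_mod_cast by omega
        simp [PySem.List.insertBy, hlt]
    rw [hsplit, List.flatMap_append, List.flatMap_append,
      insertBy_append_not _ _ _ _ h1, h2]
    have hR2 : ((List.range (m - (k+1))).map (fun i => (k+1) + i)).flatMap G
        = ((List.range (m - (k+1))).map (fun i => (k+1) + i)).flatMap F := by
      apply List.flatMap_congr
      intro j hj
      simp only [List.mem_map, List.mem_range] at hj
      obtain ⟨i, hi, rfl⟩ := hj
      rw [hGF, if_neg (by omega)]
      simp
    have hR1 : (List.range (k+1)).flatMap G = (List.range (k+1)).flatMap F ++ [x] := by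
      rw [List.range_succ, List.flatMap_append, List.flatMap_append]
      simp only [List.flatMap_singleton]
      have e1 : (List.range k).flatMap G = (List.range k).flatMap F := by
        apply List.flatMap_congr
        intro j hj
        simp only [List.mem_range] at hj
        rw [hGF, if_neg (by omega)]
        simp
      rw [e1, hGF k, if_pos rfl, List.append_assoc]
    rw [hR1, hR2, List.append_assoc]
    simp

lemma main_eq (A B : List Int) :
    get_sorted_indices_basic A B = get_sorted_indices_basic_alt A B := by
  simp only [get_sorted_indices_basic, get_sorted_indices_basic_alt]
  set pos := pvBIndexMap B with hpos
  set E := PySem.List.enumerate A with hE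
  set filtered := E.filter (fun p => pos.contains p.2) with hfiltered
  set found := filtered.map (fun p => (p.1, pos.getD p.2 0)) with hfound
  -- A's accumulation loop is filter-then-map
  rw [PySem.List.foldl_append_if (fun p => pos.contains p.2) (fun p => (p.1, pos.getD p.2 0)) E []]
  rw [List.nil_append]
  -- bound on the B-positions recorded in found
  have hbound : ∀ y ∈ found, 0 ≤ y.2 ∧ y.2 < (B.length : Int) := by
    intro y hy
    rw [hfound, List.mem_map] at hy
    obtain ⟨p, hp, rfl⟩ := hy
    rw [hfiltered, List.mem_filter] at hp
    have hc := hp.2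
    rw [PySem.Dict.contains_eq_isSome_get?] at hc
    cases hg : pos.get? p.2 with
    | none => rw [hg] at hc; simp at hc
    | some j =>
      have := pvBIndexMap_bound B p.2 j hg
      simpa [PySem.Dict.getD_eq_get?_getD, hg] using this
  rw [stable_sort_eq_buckets B.length found hbound]
  -- B's bucket loop over pairs (B-position, A-index)
  have hstep : ∀ (d : PySem.Dict Int (List Int)) (p : Int × Int), p ∈ E →
      (match pos.get? p.2 with
        | some j => d.modify j [] (· ++ [p.1])
        | none => d)
      = (if pos.contains p.2 then d.modify (pos.getD p.2 0) [] (· ++ [p.1]) else d) := by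
    intro d p _
    rw [PySem.Dict.contains_eq_isSome_get?, PySem.Dict.getD_eq_get?_getD]
    cases pos.get? p.2 <;> simp
  have hbuck : E.foldl (fun d p =>
        match pos.get? p.2 with
        | some j => d.modify j [] (· ++ [p.1])
        | none => d) PySem.Dict.empty
      = (filtered.map (fun p => (pos.getD p.2 0, p.1))).foldl
          (fun d q => d.modify q.1 [] (· ++ [q.2])) PySem.Dict.empty := by
    have h1 : E.foldl (fun d p =>
          match pos.get? p.2 with
          | some j => d.modify j [] (· ++ [p.1])
          | none => d) PySem.Dict.empty
        = E.foldl (fun d p =>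
            if pos.contains p.2 then d.modify (pos.getD p.2 0) [] (· ++ [p.1]) else d)
            PySem.Dict.empty :=
      PySem.List.foldl_congr_mem _ _ _ _ hstep
    have h2 : E.foldl (fun d p =>
          if pos.contains p.2 then d.modify (pos.getD p.2 0) [] (· ++ [p.1]) else d)
          PySem.Dict.empty
        = filtered.foldl (fun d p => d.modify (pos.getD p.2 0) [] (· ++ [p.1]))
            PySem.Dict.empty := by
      rw [hfiltered]
      exact PySem.List.foldl_if_eq_foldl_filter _ _ _ _
    rw [h1, h2, List.foldl_map]
  rw [hbuck]
  -- B's output loop is a flatMap over range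
  rw [PySem.List.len_eq, PySem.List.pyRange_zero_natCast,
    PySem.List.foldl_append_eq_flatMap, List.nil_append, List.flatMap_map]
  rw [List.map_flatMap]
  apply List.flatMap_congr
  intro j _
  rw [PySem.Dict.getD_foldl_modify_append, PySem.Dict.getD_empty, List.nil_append]
  rw [hfound]
  simp only [List.filter_map, List.map_map]
  rfl

-- ===== VERDICT (by name: the statement is the Claim_ definition above) =====
theorem get_sorted_indices_basic_spec : Claim_equal_get_sorted_indices_basic := by
  intro A B _
  unfold Spec_get_sorted_indices_basic
  exact main_eq A B
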